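-- pv_equiv track=rewrite | github.com/nathanielcr96/TensorTonic-Solutions | differencing/differencing.py | differencing
-- ===== SOURCE A (Python) =====
-- def differencing(series, order):
--     """
--     Apply d-th order differencing to the time series.
--     """
--     # Write code here
--
--     dx = []
--
--     # Save the original in 0 order
--     dx.append(series)
--
--     if order != 0:
--         for j in range(1, order + 1):
--             dx.append([])
--
--             for t in range(1, len(dx[j - 1])):
--                 dx[j].append(dx[j - 1][t] - dx[j - 1][t - 1])
--
--     return dx[order]
-- ===== SOURCE B (Python) =====
-- def differencing(series, order):
--     """
--     Apply d-th order differencing to the time series.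
--     """
--     if order <= 0:
--         return series
--     if order >= len(series):
--         return []
--     # Pascal's-row binomial coefficients of the d-th difference operator:
--     # (Delta^d s)[t] = sum_k (-1)^k C(d, k) * s[t + d - k]  (exact over ints)
--     coef = [1]
--     for _ in range(order):
--         coef = [1] + [coef[i] + coef[i + 1] for i in range(len(coef) - 1)] + [1]
--     signed = [(-1) ** k * c for k, c in enumerate(coef)]
--     return [sum(sc * series[t + order - k] for k, sc in enumerate(signed))
--             for t in range(len(series) - order)]
-- ===== Notes on version B (the rewrite author's own statement) =====
-- stated objective: alternative
-- what changed: B computes the d-th difference directly in one pass per output element as a signed-binomial windowed sum (coefficients built once from Pascal's row), instead of A's table of successive difference levels dx[j] built from dx[j-1].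
import Mathlib
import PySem

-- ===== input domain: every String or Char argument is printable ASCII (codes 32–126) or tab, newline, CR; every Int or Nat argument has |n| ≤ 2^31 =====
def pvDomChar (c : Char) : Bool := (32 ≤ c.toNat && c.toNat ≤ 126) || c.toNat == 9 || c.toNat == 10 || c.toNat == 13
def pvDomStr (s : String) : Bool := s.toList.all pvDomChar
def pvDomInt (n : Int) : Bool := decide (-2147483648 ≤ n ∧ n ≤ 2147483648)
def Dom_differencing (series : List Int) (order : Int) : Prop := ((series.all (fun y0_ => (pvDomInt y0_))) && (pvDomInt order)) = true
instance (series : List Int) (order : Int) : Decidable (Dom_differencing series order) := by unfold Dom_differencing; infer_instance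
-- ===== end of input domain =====

-- B replaces A's table of successive difference levels dx[j] by the direct signed-binomial
-- windowed sum (Δ^d s)[t] = Σ_k (-1)^k C(d,k) s[t+d-k], with Pascal's row built once (exact over Int).

-- ===== PORT A =====
-- Python: dx = [series]; for j in range(1, order+1): dx.append([]); for t in range(1, len(dx[j-1])):
--   dx[j].append(dx[j-1][t] - dx[j-1][t-1]); return dx[order].
-- dx[j] starts empty and is only ever appended to, so 'append [] then fill dx[j]' is ported
-- exactly as building the inner list by the same foldl and appending it once.
def differencing (series : List Int) (order : Int) : List Int :=
  let dx : List (List Int) := [series]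
  let dx : List (List Int) :=
    if order ≠ 0 then
      (PySem.List.pyRange 1 (order + 1) 1).foldl (fun dx j =>
        let prev : List Int := (PySem.List.pyGet? dx (j - 1)).getD []
        let inner : List Int :=
          (PySem.List.pyRange 1 prev.length 1).foldl (fun acc t =>
            acc ++ [((PySem.List.pyGet? prev t).getD 0) - ((PySem.List.pyGet? prev (t - 1)).getD 0)]) []
        dx ++ [inner]) dx
    else dx
  (PySem.List.pyGet? dx order).getD []   -- none (IndexError) is outside Pre_

-- ===== PORT B =====
-- Python: coef = [1] + [coef[i] + coef[i+1] for i in range(len(coef)-1)] + [1]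
-- (indices i, i+1 are in range, so getD is exact here)
def pvPascalNext (coef : List Int) : List Int :=
  [1] ++ (List.range (coef.length - 1)).map (fun i => coef.getD i 0 + coef.getD (i + 1) 0) ++ [1]

-- Python: if order <= 0: return series; if order >= len(series): return [];
--   coef = [1]; for _ in range(order): coef = pascal-next;
--   signed = [(-1)**k * c for k, c in enumerate(coef)]
--   return [sum(sc * series[t + order - k] for k, sc in enumerate(signed))
--           for t in range(len(series) - order)]
-- In the final branch 0 < order < len(series), so len(series)-order = series.length - order.toNat,
-- enumerate indices k are ≥ 0 (k.toNat exact) and series[t+order-k] is in range (getD exact).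
def differencing_alt (series : List Int) (order : Int) : List Int :=
  if order ≤ 0 then series
  else if (series.length : Int) ≤ order then []
  else
    let coef : List Int := (PySem.List.pyRange 0 order 1).foldl (fun c _ => pvPascalNext c) [1]
    let signed : List Int := (PySem.List.enumerate coef).map (fun kc => (-1 : Int) ^ kc.1.toNat * kc.2)
    (List.range (series.length - order.toNat)).map (fun t =>
      ((PySem.List.enumerate signed).map
        (fun ksc => ksc.2 * series.getD (t + order.toNat - ksc.1.toNat) 0)).sum)

-- ===== PRECONDITION & SPEC =====
-- Pre_ excludes only order ≤ -2, where A raises IndexError (dx[order] out of range).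
def Pre_differencing (series : List Int) (order : Int) : Prop := -1 ≤ order
instance (series : List Int) (order : Int) : Decidable (Pre_differencing series order) := by unfold Pre_differencing; infer_instance
def pvWitness_differencing : List Int × Int := ([1, 2, 4, 7], 2)

def Spec_differencing (series : List Int) (order : Int) (out : List Int) : Prop := out = differencing_alt series order
instance (series : List Int) (order : Int) (out : List Int) : Decidable (Spec_differencing series order out) := by unfold Spec_differencing; infer_instance

-- ===== CLAIM =====
def Claim_equal_differencing : Prop := ∀ (series : List Int) (order : Int), Dom_differencing series order → Pre_differencing series order → Spec_differencing series order (differencing series order)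

-- ===== LEMMAS AND PROOFS =====

-- the one-step difference operator as A computes it (pyRange/pyGet? form) …
def pvStep (l : List Int) : List Int :=
  (PySem.List.pyRange 1 l.length 1).map (fun t =>
    ((PySem.List.pyGet? l t).getD 0) - ((PySem.List.pyGet? l (t - 1)).getD 0))

-- … and in plain Nat-indexed form
def pvStepL (l : List Int) : List Int :=
  (List.range (l.length - 1)).map (fun t => l.getD (t + 1) 0 - l.getD t 0)

-- the signed-binomial window sum of the d-th difference operator
def pvW (d : Nat) (s : List Int) (t : Nat) : Int :=
  ∑ k ∈ Finset.range (d + 1), (-1 : Int) ^ k * (d.choose k) * s.getD (t + d - k) 0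

theorem pvGetD_map_range (f : Nat → Int) (n t : Nat) (h : t < n) :
    ((List.range n).map f).getD t 0 = f t := by
  rw [List.getD_eq_getElem?_getD, List.getElem?_map, List.getElem?_range h]; rfl

theorem pvSum_list_eq (f : Nat → Int) (n : Nat) :
    ((List.range n).map f).sum = ∑ k ∈ Finset.range n, f k := by
  induction n with
  | zero => simp
  | succ m ih => rw [List.range_succ, Finset.sum_range_succ]; simp [ih]

theorem pvFoldl_append_map {α β : Type} (f : α → β) (r : List α) (acc : List β) :
    r.foldl (fun acc t => acc ++ [f t]) acc = acc ++ r.map f := by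
  induction r generalizing acc with
  | nil => simp
  | cons x xs ih => simp [List.foldl, ih]

theorem pvInner_eq_step (prev : List Int) :
    (PySem.List.pyRange 1 prev.length 1).foldl (fun acc t =>
      acc ++ [((PySem.List.pyGet? prev t).getD 0) - ((PySem.List.pyGet? prev (t - 1)).getD 0)]) [] = pvStep prev := by
  rw [pvFoldl_append_map]; rfl

theorem pvStep_eq_stepL : pvStep = pvStepL := by
  funext l
  unfold pvStep pvStepL
  rw [PySem.List.pyRange_one, List.map_map]
  have hlen : ((l.length : Int) - 1).toNat = l.length - 1 := by omega
  rw [hlen]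
  refine List.map_congr_left (fun k hk => ?_)
  rw [List.mem_range] at hk
  have h1 : (1 : Int) + (k : Int) = ((k + 1 : Nat) : Int) := by push_cast; ring
  have h3 : ((k + 1 : Nat) : Int) - 1 = ((k : Nat) : Int) := by push_cast; ring
  simp only [Function.comp, h1, h3, PySem.List.pyGet?_natCast]
  rw [List.getD_eq_getElem?_getD, List.getD_eq_getElem?_getD]

-- A's outer loop builds the full table of iterates
theorem pvFoldA (series : List Int) (n : Nat) :
    (PySem.List.pyRange 1 ((n : Int) + 1) 1).foldl (fun dx j =>
        let prev : List Int := (PySem.List.pyGet? dx (j - 1)).getD []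
        let inner : List Int :=
          (PySem.List.pyRange 1 prev.length 1).foldl (fun acc t =>
            acc ++ [((PySem.List.pyGet? prev t).getD 0) - ((PySem.List.pyGet? prev (t - 1)).getD 0)]) []
        dx ++ [inner]) [series]
      = (List.range (n + 1)).map (fun i => pvStep^[i] series) := by
  induction n with
  | zero => simp [PySem.List.pyRange_one_eq_nil]
  | succ k ih =>
    have hsplit : PySem.List.pyRange 1 (((k + 1 : Nat) : Int) + 1) 1
        = PySem.List.pyRange 1 ((k : Int) + 1) 1 ++ [(k : Int) + 1] := by
      have : ((k + 1 : Nat) : Int) + 1 = ((k : Int) + 1) + 1 := by push_cast; ring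
      rw [this, PySem.List.pyRange_one_succ_right (by omega)]
    rw [hsplit, List.foldl_append, ih]
    simp only [List.foldl_cons, List.foldl_nil]
    have hidx : ((k : Int) + 1) - 1 = ((k : Nat) : Int) := by ring
    have hget : PySem.List.pyGet? ((List.range (k + 1)).map (fun i => pvStep^[i] series)) (((k : Nat) : Int))
        = some (pvStep^[k] series) := by
      rw [PySem.List.pyGet?_natCast, List.getElem?_map, List.getElem?_range (Nat.lt_succ_self k)]
      rfl
    rw [hidx, hget]
    simp only [Option.getD_some, pvInner_eq_step]
    rw [List.range_succ (n := k + 1), List.map_append]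
    congr 1
    simp [Function.iterate_succ_apply']

theorem differencing_eq_iter (series : List Int) (n : Nat) (hn : 1 ≤ n) :
    differencing series n = pvStep^[n] series := by
  unfold differencing
  have hne : ((n : Int)) ≠ 0 := by exact_mod_cast Nat.pos_iff_ne_zero.mp hn
  simp only [hne, ne_eq, not_false_eq_true, if_pos]
  rw [pvFoldA series n]
  have : PySem.List.pyGet? ((List.range (n + 1)).map (fun i => pvStep^[i] series)) ((n : Nat) : Int)
      = some (pvStep^[n] series) := by
    rw [PySem.List.pyGet?_natCast, List.getElem?_map, List.getElem?_range (Nat.lt_succ_self n)]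
    rfl
  rw [this]; rfl

-- Pascal's identity for the window sums: one more differencing level
theorem pvW_succ (d : Nat) (s : List Int) (t : Nat) :
    pvW (d + 1) s t = pvW d s (t + 1) - pvW d s t := by
  unfold pvW
  rw [Finset.sum_range_succ'
    (fun k => (-1 : Int) ^ k * ((d + 1).choose k) * s.getD (t + (d + 1) - k) 0) (d + 1)]
  rw [Finset.sum_range_succ'
    (fun k => (-1 : Int) ^ k * (d.choose k) * s.getD (t + 1 + d - k) 0) d]
  have hL : ∀ i ∈ Finset.range (d + 1),
      (-1 : Int) ^ (i + 1) * ((d + 1).choose (i + 1)) * s.getD (t + (d + 1) - (i + 1)) 0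
        = (-((-1 : Int) ^ i * (d.choose i) * s.getD (t + d - i) 0))
          + (-((-1 : Int) ^ i * (d.choose (i + 1)) * s.getD (t + d - i) 0)) := by
    intro i _
    have hidx : t + (d + 1) - (i + 1) = t + d - i := by omega
    rw [hidx, Nat.choose_succ_succ, pow_succ]
    push_cast
    ring
  rw [Finset.sum_congr rfl hL, Finset.sum_add_distrib]
  have hR : ∀ i ∈ Finset.range d,
      (-1 : Int) ^ (i + 1) * (d.choose (i + 1)) * s.getD (t + 1 + d - (i + 1)) 0
        = -((-1 : Int) ^ i * (d.choose (i + 1)) * s.getD (t + d - i) 0) := by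
    intro i _
    have hidx : t + 1 + d - (i + 1) = t + d - i := by omega
    rw [hidx, pow_succ]
    ring
  rw [Finset.sum_congr rfl hR]
  rw [Finset.sum_range_succ (fun i => -((-1 : Int) ^ i * (d.choose (i + 1)) * s.getD (t + d - i) 0)) d]
  have hzero : (d.choose (d + 1) : Int) = 0 := by
    rw [Nat.choose_succ_self]; rfl
  have hidx1 : t + (d + 1) - 0 = t + 1 + d - 0 := by omega
  rw [hzero, hidx1]
  have hsub : ∑ k ∈ Finset.range (d + 1), (-1 : Int) ^ k * (d.choose k) * s.getD (t + d - k) 0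
      = -∑ i ∈ Finset.range (d + 1), -((-1 : Int) ^ i * (d.choose i) * s.getD (t + d - i) 0) := by
    rw [← Finset.sum_neg_distrib]; simp
  rw [hsub]
  simp only [Nat.choose_zero_right, Nat.cast_one]
  ring

-- A's iterated one-step differencing computes exactly the window sums
theorem pvIter (d : Nat) (s : List Int) :
    pvStepL^[d] s = (List.range (s.length - d)).map (fun t => pvW d s t) := by
  induction d with
  | zero =>
    simp only [Function.iterate_zero, id_eq, Nat.sub_zero]
    apply List.ext_getElem (by simp)
    intro t h1 h2
    simp only [List.getElem_map, List.getElem_range]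
    unfold pvW
    rw [Finset.sum_range_succ]
    simp [List.getD_eq_getElem?_getD, List.getElem?_eq_getElem h1]
  | succ d ih =>
    rw [Function.iterate_succ_apply', ih]
    unfold pvStepL
    rw [List.length_map, List.length_range]
    have hlen : s.length - d - 1 = s.length - (d + 1) := by omega
    rw [hlen]
    refine List.map_congr_left (fun t ht => ?_)
    rw [List.mem_range] at ht
    rw [pvGetD_map_range _ _ _ (by omega), pvGetD_map_range _ _ _ (by omega)]
    exact (pvW_succ d s t).symm

-- B's Pascal fold
theorem pvFoldl_const {α β : Type} (f : α → α) (l : List β) (init : α) :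
    l.foldl (fun c _ => f c) init = f^[l.length] init := by
  induction l generalizing init with
  | nil => rfl
  | cons x xs ih => rw [List.foldl_cons, ih, List.length_cons, Function.iterate_succ_apply]

theorem pvRow (d : Nat) :
    pvPascalNext^[d] [1] = (List.range (d + 1)).map (fun k => ((d.choose k : Nat) : Int)) := by
  induction d with
  | zero => simp [List.range_succ]
  | succ d ih =>
    rw [Function.iterate_succ_apply', ih]
    unfold pvPascalNext
    rw [List.length_map, List.length_range, Nat.add_sub_cancel]
    have hmid : ∀ i ∈ List.range d,
        ((List.range (d + 1)).map (fun k => ((d.choose k : Nat) : Int))).getD i 0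
          + ((List.range (d + 1)).map (fun k => ((d.choose k : Nat) : Int))).getD (i + 1) 0
        = (((d + 1).choose (i + 1) : Nat) : Int) := by
      intro i hi
      rw [List.mem_range] at hi
      rw [pvGetD_map_range _ _ _ (by omega), pvGetD_map_range _ _ _ (by omega),
        Nat.choose_succ_succ]
      push_cast; ring
    rw [List.map_congr_left hmid]
    -- unfold the RHS range (d+2) into head, middle, last
    have hsplit : (List.range (d + 2)).map (fun k => (((d + 1).choose k : Nat) : Int))
        = [1] ++ (List.range d).map (fun i => (((d + 1).choose (i + 1) : Nat) : Int)) ++ [1] := by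
      rw [List.range_succ_eq_map, List.range_succ]
      simp [List.map_map, Function.comp, Nat.choose_self, Nat.choose_zero_right]
    rw [hsplit]

theorem pvEnumerate_map_range (n : Nat) : ∀ (f : Nat → Int) (s : Int),
    PySem.List.enumerate ((List.range n).map f) s
      = (List.range n).map (fun (k : Nat) => (s + (k : Int), f k)) := by
  induction n with
  | zero => intro f s; simp [PySem.List.enumerate_nil]
  | succ m ih =>
    intro f s
    rw [List.range_succ_eq_map, List.map_cons, PySem.List.enumerate_cons, List.map_map, ih]
    rw [List.map_cons, List.map_map]
    simp only [Nat.cast_zero, add_zero, List.cons.injEq, true_and]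
    refine List.map_congr_left (fun k _ => ?_)
    simp only [Function.comp, Prod.ext_iff]
    exact ⟨by push_cast; ring, trivial⟩

theorem pvSigned (d : Nat) :
    (PySem.List.enumerate (pvPascalNext^[d] [1])).map
        (fun kc => (-1 : Int) ^ kc.1.toNat * kc.2)
      = (List.range (d + 1)).map (fun k => (-1 : Int) ^ k * ((d.choose k : Nat) : Int)) := by
  rw [pvRow, pvEnumerate_map_range, List.map_map]
  refine List.map_congr_left (fun k _ => ?_)
  simp [Function.comp]

theorem pvInnerSum (d : Nat) (series : List Int) (t : Nat) :
    ((PySem.List.enumerate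
        ((List.range (d + 1)).map (fun k => (-1 : Int) ^ k * ((d.choose k : Nat) : Int)))).map
      (fun ksc => ksc.2 * series.getD (t + d - ksc.1.toNat) 0)).sum = pvW d series t := by
  rw [pvEnumerate_map_range, List.map_map]
  unfold pvW
  rw [← pvSum_list_eq]
  refine congrArg List.sum (List.map_congr_left (fun k _ => ?_))
  simp [Function.comp]

-- ===== VERDICT =====
theorem differencing_spec : Claim_equal_differencing := by
  intro series order _ hpre
  unfold Spec_differencing
  unfold Pre_differencing at hpre
  rcases lt_trichotomy order 0 with hneg | hz | hpos
  · -- order = -1: A returns dx[-1] = series (range(1,0) empty); B returns series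
    have : order = -1 := by omega
    subst this
    simp [differencing, differencing_alt, PySem.List.pyRange_one_eq_nil, PySem.List.pyGet?_neg_one]
  · subst hz
    simp [differencing, differencing_alt, PySem.List.pyGet?, PySem.List.pyIdx?]
  · obtain ⟨n, rfl⟩ : ∃ n : Nat, order = (n : Int) := ⟨order.toNat, by omega⟩
    have hn : 1 ≤ n := by exact_mod_cast hpos
    rw [differencing_eq_iter series n hn, pvStep_eq_stepL, pvIter]
    unfold differencing_alt
    have hnot : ¬ ((n : Int) ≤ 0) := by omega
    rw [if_neg hnot]
    by_cases hlen : (series.length : Int) ≤ (n : Int)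
    · rw [if_pos hlen]
      have : series.length - n = 0 := by omega
      rw [this]; rfl
    · rw [if_neg hlen]
      have hfold : (PySem.List.pyRange 0 (n : Int) 1).foldl (fun c _ => pvPascalNext c) [1]
          = pvPascalNext^[n] [1] := by
        rw [pvFoldl_const, PySem.List.length_pyRange_one]
        norm_num
      simp only [hfold, pvSigned, Int.toNat_natCast]
      exact List.map_congr_left (fun t _ => (pvInnerSum n series t).symm)
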